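-- pv_equiv track=rewrite | github.com/mikhaidn/AoC | 2015/1/solution.py | scannerSolution
-- ===== SOURCE A (Python) =====
-- def scannerSolution(inputs,goal,a):
--     flat_list = [item for sublist in inputs for item in sublist]
--     counter =0
--     iter = 0
--     for c in flat_list:
--         iter +=1
--         if c == "(":counter +=1
--         else: counter -=1
--         if counter == goal: return iter
--
--     return
-- ===== SOURCE B (Python) =====
-- def scannerSolution(inputs, goal, a):
--     # Galloping/skip search: the balance moves by exactly 1 per character, so from
--     # balance bal the first possible hit is |goal - bal| characters ahead; jump
--     # straight there (summing the skipped chunk) instead of checking every position.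
--     flat = [1 if c == "(" else -1 for sub in inputs for c in sub]
--     n = len(flat)
--     i = 0
--     bal = 0
--     while True:
--         if bal == goal and i > 0:
--             return i
--         jump = abs(goal - bal) or 1
--         if i + jump > n:
--             return None
--         bal += sum(flat[i:i + jump])
--         i += jump
-- ===== Notes on version B (the rewrite author's own statement) =====
-- stated objective: alternative
-- what changed: B replaces A's per-character count-and-check loop by a galloping skip search on a precomputed +1/-1 value list: since the balance changes by exactly 1 per character, from balance bal the first possible hit is |goal-bal| characters ahead, so B jumps there in chunks (summing each skipped slice) instead of testing every position.
import Mathlib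
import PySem

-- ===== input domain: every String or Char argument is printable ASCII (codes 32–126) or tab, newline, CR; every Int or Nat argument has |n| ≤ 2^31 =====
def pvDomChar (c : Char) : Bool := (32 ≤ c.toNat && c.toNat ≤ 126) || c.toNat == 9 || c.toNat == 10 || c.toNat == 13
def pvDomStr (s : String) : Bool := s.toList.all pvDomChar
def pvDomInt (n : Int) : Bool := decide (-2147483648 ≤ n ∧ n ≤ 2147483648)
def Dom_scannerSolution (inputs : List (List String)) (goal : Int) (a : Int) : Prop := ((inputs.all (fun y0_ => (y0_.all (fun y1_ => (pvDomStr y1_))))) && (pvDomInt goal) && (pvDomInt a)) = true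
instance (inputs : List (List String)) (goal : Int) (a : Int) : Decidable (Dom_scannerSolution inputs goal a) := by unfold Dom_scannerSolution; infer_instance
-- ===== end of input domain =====

-- B replaces A's per-character count-and-check loop by a galloping skip search:
-- since the balance moves by exactly 1 per character, from balance bal the first
-- possible hit is |goal - bal| characters ahead, so B jumps there in chunks.
-- Same worst-case cost, different algorithm ("alternative").

-- ===== PORT A =====
-- the fused loop of A: advances iter, updates counter, returns on first hit
def pvLoopA (goal : Int) : List String → Int → Int → Option Int
  | [], _, _ => none
  | c :: rest, counter, iter =>
    let iter' := iter + 1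
    let counter' := if c = "(" then counter + 1 else counter - 1
    if counter' = goal then some iter' else pvLoopA goal rest counter' iter'

def scannerSolution (inputs : List (List String)) (goal : Int) (a : Int) : Option Int :=
  let flat_list := inputs.flatMap (fun sublist => sublist)
  pvLoopA goal flat_list 0 0

-- ===== PORT B =====
-- the while-loop of B over (i, bal); `jump = abs(goal - bal) or 1`;
-- ((flat.drop i).take jump).sum is Python's sum(flat[i:i+jump]) (0 ≤ i here)
def pvWhileB (flat : List Int) (goal : Int) (n : Nat) (i : Nat) (bal : Int) : Option Int :=
  if bal = goal ∧ 0 < i then some (i : Int)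
  else if n < i + (if goal - bal = 0 then 1 else (goal - bal).natAbs) then none
  else pvWhileB flat goal n (i + (if goal - bal = 0 then 1 else (goal - bal).natAbs))
        (bal + ((flat.drop i).take (if goal - bal = 0 then 1 else (goal - bal).natAbs)).sum)
termination_by n - i
decreasing_by
  rename_i h1 h2
  split at h2 <;> split <;> omega

def scannerSolution_alt (inputs : List (List String)) (goal : Int) (a : Int) : Option Int :=
  let flat := inputs.flatMap (fun sub => sub.map (fun c => if c = "(" then (1 : Int) else -1))
  pvWhileB flat goal flat.length 0 0

-- ===== PRECONDITION & SPEC =====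
def Spec_scannerSolution (inputs : List (List String)) (goal : Int) (a : Int) (out : Option Int) : Prop := out = scannerSolution_alt inputs goal a
instance (inputs : List (List String)) (goal : Int) (a : Int) (out : Option Int) : Decidable (Spec_scannerSolution inputs goal a out) := by unfold Spec_scannerSolution; infer_instance

-- ===== CLAIM (what is proved, stated in full; the proofs are below) =====
def Claim_equal_scannerSolution : Prop := ∀ (inputs : List (List String)) (goal : Int) (a : Int), Dom_scannerSolution inputs goal a → Spec_scannerSolution inputs goal a (scannerSolution inputs goal a)

-- ===== LEMMAS AND PROOFS =====

-- proof-side linear search over the ±1 value list (common denominator of A and B)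
def pvLin (goal : Int) : List Int → Int → Int → Option Int
  | [], _, _ => none
  | v :: rest, bal, i => if bal + v = goal then some (i + 1) else pvLin goal rest (bal + v) (i + 1)

theorem pvLoopA_eq_lin (goal : Int) (l : List String) (counter iter : Int) :
    pvLoopA goal l counter iter
      = pvLin goal (l.map (fun c => if c = "(" then (1 : Int) else -1)) counter iter := by
  induction l generalizing counter iter with
  | nil => rfl
  | cons c rest ih =>
    simp only [pvLoopA, List.map_cons, pvLin]
    have hc : (if c = "(" then counter + 1 else counter - 1)
        = counter + (if c = "(" then (1 : Int) else -1) := by split_ifs <;> ring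
    rw [hc]
    by_cases h : counter + (if c = "(" then (1 : Int) else -1) = goal
    · simp [h]
    · simp [h, ih]

theorem pvSumAbs (l : List Int) (h : ∀ x ∈ l, x.natAbs = 1) : l.sum.natAbs ≤ l.length := by
  induction l with
  | nil => simp
  | cons v rest ih =>
    have hv := h v (by simp)
    have hr := ih (fun x hx => h x (by simp [hx]))
    calc (v + rest.sum).natAbs ≤ v.natAbs + rest.sum.natAbs := Int.natAbs_add_le _ _
      _ ≤ (v :: rest).length := by simp [hv]; omega

theorem pvLin_none (goal : Int) (l : List Int) (bal : Int) (i : Int)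
    (h : ∀ m, 1 ≤ m → m ≤ l.length → bal + ((l.take m).sum) ≠ goal) :
    pvLin goal l bal i = none := by
  induction l generalizing bal i with
  | nil => rfl
  | cons v rest ih =>
    have h1 : bal + v ≠ goal := by
      have := h 1 le_rfl (by simp)
      simpa using this
    simp only [pvLin, h1, if_false]
    exact ih (bal + v) (i + 1) (fun m hm1 hm2 => by
      have := h (m + 1) (by omega) (by simpa using by omega)
      simpa [List.take_succ_cons, add_assoc] using this)

theorem pvLin_skip (goal : Int) (jump : Nat) (l : List Int) (bal : Int) (i : Int)
    (hj : 1 ≤ jump) (hl : jump ≤ l.length)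
    (h : ∀ m, 1 ≤ m → m < jump → bal + ((l.take m).sum) ≠ goal) :
    pvLin goal l bal i
      = (if bal + ((l.take jump).sum) = goal then some (i + jump)
         else pvLin goal (l.drop jump) (bal + ((l.take jump).sum)) (i + jump)) := by
  induction jump generalizing l bal i with
  | zero => omega
  | succ k ih =>
    cases l with
    | nil => simp at hl
    | cons v rest =>
      by_cases hk : k = 0
      · subst hk
        simp [pvLin, add_assoc]
      · have h1 : bal + v ≠ goal := by
          have := h 1 le_rfl (by omega)
          simpa using this
        simp only [pvLin, h1, if_false]
        have := ih rest (bal + v) (i + 1) (by omega) (by simp at hl; omega)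
          (fun m hm1 hm2 => by
            have := h (m + 1) (by omega) (by omega)
            simpa [List.take_succ_cons, add_assoc] using this)
        rw [this]
        simp [List.take_succ_cons, List.drop_succ_cons, add_assoc]
        ring_nf

theorem pvWhileB_eq_lin (flat : List Int) (goal : Int)
    (hmem : ∀ x ∈ flat, x.natAbs = 1) :
    ∀ k i bal, flat.length - i ≤ k → i ≤ flat.length →
    pvWhileB flat goal flat.length i bal
      = (if bal = goal ∧ 0 < i then some (i : Int) else pvLin goal (flat.drop i) bal i) := by
  intro k
  induction k with
  | zero =>
    intro i bal hk hi
    have hin : i = flat.length := by omega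
    subst hin
    rw [pvWhileB]
    by_cases hret : bal = goal ∧ 0 < flat.length
    · simp [hret]
    · have hjump : (1:Nat) ≤ (if goal - bal = 0 then 1 else (goal - bal).natAbs) := by
        split <;> omega
      have hov : flat.length < flat.length + (if goal - bal = 0 then 1 else (goal - bal).natAbs) := by omega
      simp [hret, hov, List.drop_length, pvLin]
  | succ k ih =>
    intro i bal hk hi
    rw [pvWhileB]
    by_cases hret : bal = goal ∧ 0 < i
    · simp [hret]
    · have hjump : (1:Nat) ≤ (if goal - bal = 0 then 1 else (goal - bal).natAbs) := by
        split <;> omega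
      simp only [hret, if_false]
      set jump := (if goal - bal = 0 then 1 else (goal - bal).natAbs) with hjdef
      have habs : ∀ m, 1 ≤ m → m < jump → bal + (((flat.drop i).take m).sum) ≠ goal := by
        intro m hm1 hm2 heq
        have hd0 : goal - bal ≠ 0 := by
          intro h0; rw [hjdef] at hm2; simp [h0] at hm2; omega
        have hja : jump = (goal - bal).natAbs := by rw [hjdef]; simp [hd0]
        have hsum : ((flat.drop i).take m).sum = goal - bal := by omega
        have hle : (((flat.drop i).take m).sum).natAbs ≤ m := by
          have := pvSumAbs ((flat.drop i).take m)
            (fun x hx => hmem x (List.mem_of_mem_drop (List.mem_of_mem_take hx)))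
          calc (((flat.drop i).take m).sum).natAbs ≤ ((flat.drop i).take m).length := this
            _ ≤ m := by simp
        rw [hsum] at hle
        omega
      by_cases hov : flat.length < i + jump
      · -- A's linear search also fails: fewer than jump characters remain
        simp only [hov, if_true]
        have hnone : pvLin goal (flat.drop i) bal i = none := by
          apply pvLin_none
          intro m hm1 hm2 heq
          have hml : m < jump := by
            have : (flat.drop i).length = flat.length - i := by simp
            omega
          exact habs m hm1 hml heq
        simp [hnone]
      · simp only [hov, if_false]
        have hi' : i + jump ≤ flat.length := by omega
        have := ih (i + jump) (bal + (((flat.drop i).take jump).sum)) (by omega) hi'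
        rw [this]
        have hskip := pvLin_skip goal jump (flat.drop i) bal (i : Int) hjump
          (by simp; omega) habs
        rw [hskip]
        have hpos : 0 < i + jump := by omega
        have hdd : (flat.drop i).drop jump = flat.drop (i + jump) := by
          rw [List.drop_drop]
        by_cases hg : bal + (((flat.drop i).take jump).sum) = goal
        · simp [hg, hpos]
        · simp [hg, hpos, hdd]

theorem pvMapMem (l : List String) :
    ∀ x ∈ l.map (fun c => if c = "(" then (1 : Int) else -1), x.natAbs = 1 := by
  intro x hx
  simp only [List.mem_map] at hx
  obtain ⟨c, _, hc⟩ := hx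
  subst hc
  split <;> rfl

-- ===== VERDICT (by name: the statement is the Claim_ definition above) =====
theorem scannerSolution_spec : Claim_equal_scannerSolution := by
  intro inputs goal a _
  show scannerSolution inputs goal a = scannerSolution_alt inputs goal a
  simp only [scannerSolution, scannerSolution_alt]
  have hflat : inputs.flatMap (fun sub => sub.map (fun c => if c = "(" then (1 : Int) else -1))
      = (inputs.flatMap (fun sublist => sublist)).map (fun c => if c = "(" then (1 : Int) else -1) := by
    rw [List.map_flatMap]
  rw [hflat]
  set vals := (inputs.flatMap (fun sublist => sublist)).map
    (fun c => if c = "(" then (1 : Int) else -1) with hv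
  have hmem : ∀ x ∈ vals, x.natAbs = 1 := pvMapMem _
  rw [pvWhileB_eq_lin vals goal hmem vals.length 0 0 (by omega) (by omega)]
  simp only [List.drop_zero, Nat.lt_irrefl, and_false, if_false]
  rw [pvLoopA_eq_lin, ← hv]
  rfl
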